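-- pv_equiv track=rewrite | github.com/MeridianResearch/cot_health_metrics | src/organism_data/data/prepare_syntactic_internalized_dataset.py | generate_filler_content
-- ===== SOURCE A (Python) =====
-- def generate_filler_content(filler_type: str, length: int = 50) -> str:
--     """Generate filler content based on type"""
--     if filler_type == "dots":
--         # Using .... pattern as specified
--         repetitions = length // 4
--         return ".... " * repetitions
--
--     elif filler_type == "think_token":
--         return "think " * length
--
--     elif filler_type == "number_words":
--         # Cycle through "one two three" pattern
--         number_pattern = ["one", "two", "three"]
--         result = []
--         for i in range(length):
--             result.append(number_pattern[i % 3])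
--         return " ".join(result)
--
--     elif filler_type == "lorem_ipsum":
--         lorem_phrases = [
--             "Lorem ipsum dolor sit amet consectetur adipiscing elit",
--             "sed do eiusmod tempor incididunt ut labore et dolore magna aliqua",
--             "Ut enim ad minim veniam quis nostrud exercitation ullamco laboris",
--             "nisi ut aliquip ex ea commodo consequat",
--             "Duis aute irure dolor in reprehenderit in voluptate velit",
--             "esse cillum dolore eu fugiat nulla pariatur",
--             "Excepteur sint occaecat cupidatat non proident",
--             "sunt in culpa qui officia deserunt mollit anim id est laborum",
--             "Sed ut perspiciatis unde omnis iste natus error sit voluptatem",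
--             "accusantium doloremque laudantium totam rem aperiam",
--             "eaque ipsa quae ab illo inventore veritatis et quasi architecto",
--             "beatae vitae dicta sunt explicabo",
--             "Nemo enim ipsam voluptatem quia voluptas sit aspernatur",
--             "aut odit aut fugit sed quia consequuntur magni dolores eos",
--             "qui ratione voluptatem sequi nesciunt",
--             "Neque porro quisquam est qui dolorem ipsum quia dolor sit amet",
--             "consectetur adipisci velit sed quia non numquam eius modi",
--             "tempora incidunt ut labore et dolore magnam aliquam quaerat voluptatem"
--         ]
--
--         result = []
--         word_count = 0
--         phrase_index = 0
--
--         while word_count < length: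
--             current_phrase = lorem_phrases[phrase_index % len(lorem_phrases)]
--             phrase_words = current_phrase.split()
--
--             remaining = length - word_count
--             if remaining >= len(phrase_words):
--                 result.extend(phrase_words)
--                 word_count += len(phrase_words)
--             else:
--                 result.extend(phrase_words[:remaining])
--                 word_count += remaining
--
--             phrase_index += 1
--
--         return " ".join(result)
--
--     else:
--         return "... " * length
-- ===== SOURCE B (Python) =====
-- LOREM_PHRASES = [
--     "Lorem ipsum dolor sit amet consectetur adipiscing elit",
--     "sed do eiusmod tempor incididunt ut labore et dolore magna aliqua",
--     "Ut enim ad minim veniam quis nostrud exercitation ullamco laboris",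
--     "nisi ut aliquip ex ea commodo consequat",
--     "Duis aute irure dolor in reprehenderit in voluptate velit",
--     "esse cillum dolore eu fugiat nulla pariatur",
--     "Excepteur sint occaecat cupidatat non proident",
--     "sunt in culpa qui officia deserunt mollit anim id est laborum",
--     "Sed ut perspiciatis unde omnis iste natus error sit voluptatem",
--     "accusantium doloremque laudantium totam rem aperiam",
--     "eaque ipsa quae ab illo inventore veritatis et quasi architecto",
--     "beatae vitae dicta sunt explicabo",
--     "Nemo enim ipsam voluptatem quia voluptas sit aspernatur",
--     "aut odit aut fugit sed quia consequuntur magni dolores eos",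
--     "qui ratione voluptatem sequi nesciunt",
--     "Neque porro quisquam est qui dolorem ipsum quia dolor sit amet",
--     "consectetur adipisci velit sed quia non numquam eius modi",
--     "tempora incidunt ut labore et dolore magnam aliquam quaerat voluptatem",
-- ]
--
--
-- def generate_filler_content(filler_type: str, length: int = 50) -> str:
--     """Generate filler content based on type"""
--     if filler_type == "dots":
--         return ".... " * (length // 4)
--     if filler_type == "think_token":
--         return "think " * length
--     if filler_type == "number_words":
--         pattern = ["one", "two", "three"]
--         return " ".join(pattern[i % 3] for i in range(length))
--     if filler_type == "lorem_ipsum":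
--         # flatten once, then one word-level pass with modular indexing
--         flat = " ".join(LOREM_PHRASES).split()
--         n = len(flat)
--         return " ".join(flat[i % n] for i in range(length))
--     return "... " * length
-- ===== Notes on version B (the rewrite author's own statement) =====
-- stated objective: simpler
-- what changed: The lorem_ipsum branch's phrase-by-phrase while loop with word_count/remaining bookkeeping and a truncation branch is replaced by flattening the phrase list into one word list and emitting exactly `length` words by modular indexing; the number_words loop becomes a direct join over a range.
import Mathlib
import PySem

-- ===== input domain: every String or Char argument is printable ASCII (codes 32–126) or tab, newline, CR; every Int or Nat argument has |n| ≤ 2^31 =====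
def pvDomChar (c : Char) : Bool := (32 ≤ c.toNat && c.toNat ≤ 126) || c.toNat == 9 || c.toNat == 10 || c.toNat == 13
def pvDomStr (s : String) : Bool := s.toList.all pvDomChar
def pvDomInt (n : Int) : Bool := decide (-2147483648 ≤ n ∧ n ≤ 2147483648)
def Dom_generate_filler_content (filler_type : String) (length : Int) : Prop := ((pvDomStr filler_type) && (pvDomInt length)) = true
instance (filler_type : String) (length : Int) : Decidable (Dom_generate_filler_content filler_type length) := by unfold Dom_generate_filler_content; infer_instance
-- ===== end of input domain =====

-- B simplifies A's lorem_ipsum branch: the phrase-by-phrase while loop with word_count bookkeeping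
-- becomes one modular-index pass over the flattened word list (objective: simpler; equal return value).

-- shared constant (the module-level phrase list both Pythons read)
def lorem_phrases : List String := [
  "Lorem ipsum dolor sit amet consectetur adipiscing elit",
  "sed do eiusmod tempor incididunt ut labore et dolore magna aliqua",
  "Ut enim ad minim veniam quis nostrud exercitation ullamco laboris",
  "nisi ut aliquip ex ea commodo consequat",
  "Duis aute irure dolor in reprehenderit in voluptate velit",
  "esse cillum dolore eu fugiat nulla pariatur",
  "Excepteur sint occaecat cupidatat non proident",
  "sunt in culpa qui officia deserunt mollit anim id est laborum",
  "Sed ut perspiciatis unde omnis iste natus error sit voluptatem",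
  "accusantium doloremque laudantium totam rem aperiam",
  "eaque ipsa quae ab illo inventore veritatis et quasi architecto",
  "beatae vitae dicta sunt explicabo",
  "Nemo enim ipsam voluptatem quia voluptas sit aspernatur",
  "aut odit aut fugit sed quia consequuntur magni dolores eos",
  "qui ratione voluptatem sequi nesciunt",
  "Neque porro quisquam est qui dolorem ipsum quia dolor sit amet",
  "consectetur adipisci velit sed quia non numquam eius modi",
  "tempora incidunt ut labore et dolore magnam aliquam quaerat voluptatem"]

-- Python's  s * n  on a string (exact: repeats the character sequence, "" for n ≤ 0)
def strRepeat (s : String) (n : Int) : String := String.ofList (PySem.List.pyRepeat s.toList n)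

-- termination fact for A's while loop: every phrase splits into at least one word
set_option maxRecDepth 8192 in
theorem lorem_phrase_words_pos : ∀ k < 18, 1 ≤ (PySem.Str.split₀ (lorem_phrases.getD k "")).length := by decide

-- ===== PORT A =====
-- A's while loop: structural recursion on (length - word_count); each iteration adds ≥ 1 word
def loremLoopA (length : Int) (result : List String) (word_count : Int) (phrase_index : Int) : List String :=
  if _h : word_count < length then
    let current_phrase := PySem.List.pyGetD lorem_phrases (PySem.Int.mod phrase_index (PySem.List.len lorem_phrases)) ""
    let phrase_words := PySem.Str.split₀ current_phrase
    let remaining := length - word_count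
    if ((phrase_words.length : Int)) ≤ remaining then
      loremLoopA length (result ++ phrase_words) (word_count + phrase_words.length) (phrase_index + 1)
    else
      result ++ PySem.List.slice phrase_words none (some remaining)
  else result
termination_by (length - word_count).toNat
decreasing_by
  have hk : 0 ≤ PySem.Int.mod phrase_index (PySem.List.len lorem_phrases) :=
    PySem.Int.mod_nonneg _ (by decide)
  have hk2 : PySem.Int.mod phrase_index (PySem.List.len lorem_phrases) < PySem.List.len lorem_phrases :=
    PySem.Int.mod_lt _ (by decide)
  have hlen : PySem.List.len lorem_phrases = (18 : Int) := by decide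
  have hw : 1 ≤ (PySem.Str.split₀ (PySem.List.pyGetD lorem_phrases (PySem.Int.mod phrase_index (PySem.List.len lorem_phrases)) "")).length := by
    rw [PySem.List.pyGetD_of_nonneg _ _ hk]
    exact lorem_phrase_words_pos _ (by omega)
  omega

def generate_filler_content (filler_type : String) (length : Int) : String :=
  if filler_type = "dots" then
    strRepeat ".... " (PySem.Int.floordiv length 4)
  else if filler_type = "think_token" then
    strRepeat "think " length
  else if filler_type = "number_words" then
    let number_pattern : List String := ["one", "two", "three"]
    let result := (PySem.List.pyRange 0 length 1).foldl
      (fun acc i => acc ++ [PySem.List.pyGetD number_pattern (PySem.Int.mod i 3) ""]) []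
    PySem.Str.join " " result
  else if filler_type = "lorem_ipsum" then
    PySem.Str.join " " (loremLoopA length [] 0 0)
  else
    strRepeat "... " length

-- ===== PORT B =====
-- flat = ' '.join(lorem_phrases).split()
def flatWords : List String := PySem.Str.split₀ (PySem.Str.join " " lorem_phrases)

def generate_filler_content_alt (filler_type : String) (length : Int) : String :=
  if filler_type = "dots" then
    strRepeat ".... " (PySem.Int.floordiv length 4)
  else if filler_type = "think_token" then
    strRepeat "think " length
  else if filler_type = "number_words" then
    let pattern : List String := ["one", "two", "three"]
    PySem.Str.join " " ((PySem.List.pyRange 0 length 1).map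
      (fun i => PySem.List.pyGetD pattern (PySem.Int.mod i 3) ""))
  else if filler_type = "lorem_ipsum" then
    PySem.Str.join " " ((PySem.List.pyRange 0 length 1).map
      (fun i => PySem.List.pyGetD flatWords (PySem.Int.mod i (PySem.List.len flatWords)) ""))
  else
    strRepeat "... " length

-- ===== PRECONDITION & SPEC =====
def Spec_generate_filler_content (filler_type : String) (length : Int) (out : String) : Prop := out = generate_filler_content_alt filler_type length
instance (filler_type : String) (length : Int) (out : String) : Decidable (Spec_generate_filler_content filler_type length out) := by unfold Spec_generate_filler_content; infer_instance

-- ===== CLAIM (what is proved, stated in full; the proofs are below) =====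
def Claim_equal_generate_filler_content : Prop := ∀ (filler_type : String) (length : Int), Dom_generate_filler_content filler_type length → Spec_generate_filler_content filler_type length (generate_filler_content filler_type length)

-- ===== LEMMAS AND PROOFS =====

-- the flattened word list, as a literal (proved equal to flatWords) so the finite facts below evaluate fast
def flatLit : List String := ["Lorem",
  "ipsum",
  "dolor",
  "sit",
  "amet",
  "consectetur",
  "adipiscing",
  "elit",
  "sed",
  "do",
  "eiusmod",
  "tempor",
  "incididunt",
  "ut",
  "labore",
  "et",
  "dolore",
  "magna",
  "aliqua",
  "Ut",
  "enim",
  "ad",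
  "minim",
  "veniam",
  "quis",
  "nostrud",
  "exercitation",
  "ullamco",
  "laboris",
  "nisi",
  "ut",
  "aliquip",
  "ex",
  "ea",
  "commodo",
  "consequat",
  "Duis",
  "aute",
  "irure",
  "dolor",
  "in",
  "reprehenderit",
  "in",
  "voluptate",
  "velit",
  "esse",
  "cillum",
  "dolore",
  "eu",
  "fugiat",
  "nulla",
  "pariatur",
  "Excepteur",
  "sint",
  "occaecat",
  "cupidatat",
  "non",
  "proident",
  "sunt",
  "in",
  "culpa",
  "qui",
  "officia",
  "deserunt",
  "mollit",
  "anim",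
  "id",
  "est",
  "laborum",
  "Sed",
  "ut",
  "perspiciatis",
  "unde",
  "omnis",
  "iste",
  "natus",
  "error",
  "sit",
  "voluptatem",
  "accusantium",
  "doloremque",
  "laudantium",
  "totam",
  "rem",
  "aperiam",
  "eaque",
  "ipsa",
  "quae",
  "ab",
  "illo",
  "inventore",
  "veritatis",
  "et",
  "quasi",
  "architecto",
  "beatae",
  "vitae",
  "dicta",
  "sunt",
  "explicabo",
  "Nemo",
  "enim",
  "ipsam",
  "voluptatem",
  "quia",
  "voluptas",
  "sit",
  "aspernatur",
  "aut",
  "odit",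
  "aut",
  "fugit",
  "sed",
  "quia",
  "consequuntur",
  "magni",
  "dolores",
  "eos",
  "qui",
  "ratione",
  "voluptatem",
  "sequi",
  "nesciunt",
  "Neque",
  "porro",
  "quisquam",
  "est",
  "qui",
  "dolorem",
  "ipsum",
  "quia",
  "dolor",
  "sit",
  "amet",
  "consectetur",
  "adipisci",
  "velit",
  "sed",
  "quia",
  "non",
  "numquam",
  "eius",
  "modi",
  "tempora",
  "incidunt",
  "ut",
  "labore",
  "et",
  "dolore",
  "magnam",
  "aliquam",
  "quaerat",
  "voluptatem"]

set_option maxRecDepth 8192 in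
set_option maxHeartbeats 2000000 in
theorem flatWords_eq : flatWords = flatLit := by decide

-- word count of phrase k and cumulative word offsets
def wcF (k : Nat) : Nat := (PySem.Str.split₀ (lorem_phrases.getD k "")).length
def SF (k : Nat) : Nat := ((List.range k).map wcF).sum

set_option maxRecDepth 8192 in
theorem factN : flatLit.length = SF 18 := by decide

set_option maxRecDepth 8192 in
theorem factPosLt : ∀ k < 18, SF k < flatLit.length := by decide

set_option maxRecDepth 8192 in
theorem factWord : ∀ k < 18, ∀ m < wcF k,
    (PySem.Str.split₀ (lorem_phrases.getD k "")).getD m "" = flatLit.getD (SF k + m) "" := by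
  decide

set_option maxRecDepth 8192 in
theorem factStep : ∀ k < 18, (SF k + wcF k) % flatLit.length = SF ((k + 1) % 18) := by decide

set_option maxRecDepth 8192 in
theorem factSum : ∀ k < 18, SF k + wcF k ≤ SF 18 := by decide

-- A's loop, started at phrase j with L words still wanted, emits words pos..pos+L-1 of the cyclic stream
theorem loremLoopA_spec : ∀ (L : Nat) (length word_count : Int) (j : Nat) (result : List String),
    (length - word_count).toNat = L →
    loremLoopA length result word_count (j : Int) =
      result ++ (List.range L).map
        (fun i => flatLit.getD ((SF (j % 18) + i) % flatLit.length) "") := by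
  intro L
  induction L using Nat.strong_induction_on with
  | _ L IH =>
    intro length word_count j result hL
    rw [loremLoopA]
    by_cases hlt : word_count < length
    · simp only [dif_pos hlt]
      have hlen : PySem.List.len lorem_phrases = (18 : Int) := by decide
      have hget : PySem.List.pyGetD lorem_phrases (PySem.Int.mod (j : Int) (PySem.List.len lorem_phrases)) ""
          = lorem_phrases.getD (j % 18) "" := by
        rw [hlen]
        rw [show PySem.Int.mod (j : Int) (18 : Int) = ((j % 18 : Nat) : Int) from
          (by exact_mod_cast PySem.Int.mod_natCast j 18)]
        rw [PySem.List.pyGetD_natCast]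
      rw [hget]
      set k := j % 18 with hk
      have hk18 : k < 18 := Nat.mod_lt _ (by omega)
      have hwc : (PySem.Str.split₀ (lorem_phrases.getD k "")).length = wcF k := rfl
      have hw1 : 1 ≤ wcF k := lorem_phrase_words_pos k hk18
      have hL1 : 1 ≤ L := by omega
      have hSlt : SF k < flatLit.length := factPosLt k hk18
      have hSk1 : SF k + wcF k ≤ SF 18 := factSum k hk18
      have helem : ∀ m, m < wcF k → (PySem.Str.split₀ (lorem_phrases.getD k "")).getD m "" =
          flatLit.getD ((SF k + m) % flatLit.length) "" := by
        intro m hm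
        have hlt' : SF k + m < flatLit.length := by rw [factN]; omega
        rw [Nat.mod_eq_of_lt hlt']
        exact factWord k hk18 m hm
      by_cases hbr : (((PySem.Str.split₀ (lorem_phrases.getD k "")).length : Int)) ≤ length - word_count
      · rw [if_pos hbr]
        have hwle : wcF k ≤ L := by rw [hwc] at hbr; omega
        have hrec : ((j : Int) + 1) = ((j + 1 : Nat) : Int) := by push_cast; ring
        have hL' : (length - (word_count + ((PySem.Str.split₀ (lorem_phrases.getD k "")).length : Int))).toNat = L - wcF k := by
          rw [hwc]; omega
        rw [hrec, IH (L - wcF k) (by omega) _ _ _ _ hL']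
        rw [List.append_assoc]
        congr 1
        have hLsplit : L = wcF k + (L - wcF k) := by omega
        rw [hLsplit, List.range_add, List.map_append, List.map_map]
        congr 1
        · -- first wcF k stream words are exactly phrase k
          apply List.ext_getElem
          · simp only [List.length_map, List.length_range, hwc]
          · intro i hi1 hi2
            simp only [List.getElem_map, List.getElem_range]
            have hiw : i < wcF k := by rw [hwc] at hi1; exact hi1
            have h := helem i hiw
            rw [List.getD_eq_getElem _ _ hi1] at h
            exact h
        · -- remaining words: shift the offset by one phrase
          rw [show wcF k + (L - wcF k) - wcF k = L - wcF k from by omega]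
          apply List.map_congr_left
          intro i _
          simp only [Function.comp]
          have hk1 : (j + 1) % 18 = (k + 1) % 18 := by omega
          rw [hk1]
          symm
          calc flatLit.getD ((SF k + (wcF k + i)) % flatLit.length) ""
              = flatLit.getD (((SF k + wcF k) % flatLit.length + i) % flatLit.length) "" := by
                rw [Nat.mod_add_mod, Nat.add_assoc]
            _ = flatLit.getD ((SF ((k + 1) % 18) + i) % flatLit.length) "" := by
                rw [factStep k hk18]
      · rw [if_neg hbr]
        have hrem0 : (0 : Int) ≤ length - word_count := by omega
        rw [PySem.List.slice_to _ hrem0]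
        congr 1
        have hLw : L < wcF k := by rw [hwc] at hbr; omega
        have htn : (length - word_count).toNat = L := hL
        apply List.ext_getElem
        · simp only [List.length_take, List.length_map, List.length_range, hwc, htn]
          omega
        · intro i hi1 hi2
          simp only [List.getElem_take, List.getElem_map, List.getElem_range]
          have hiw : i < wcF k := by
            simp only [List.length_take, hwc, htn] at hi1
            omega
          have h := helem i hiw
          rw [List.getD_eq_getElem _ _ (by rw [hwc]; omega)] at h
          exact h
    · rw [dif_neg hlt]
      have : L = 0 := by omega
      simp [this]

-- ===== VERDICT (by name: the statement is the Claim_ definition above) =====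
set_option maxRecDepth 8192 in
theorem generate_filler_content_spec : Claim_equal_generate_filler_content := by
  intro filler_type length _
  unfold Spec_generate_filler_content generate_filler_content generate_filler_content_alt
  by_cases h1 : filler_type = "dots"
  · simp [h1]
  by_cases h2 : filler_type = "think_token"
  · simp [h2]
  by_cases h3 : filler_type = "number_words"
  · subst h3
    simp only [if_neg h1, if_neg h2, if_true]
    rw [PySem.List.foldl_append_singleton_eq_map]
    simp
  by_cases h4 : filler_type = "lorem_ipsum"
  · subst h4
    simp only [if_neg h1, if_neg h2, if_neg h3, if_true]
    have hmain := loremLoopA_spec length.toNat length 0 0 [] (by omega)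
    rw [Nat.cast_zero] at hmain
    rw [hmain, List.nil_append]
    apply congrArg
    rw [PySem.List.pyRange_one, List.map_map, sub_zero]
    apply List.map_congr_left
    intro i hi
    simp only [Function.comp, zero_add]
    rw [show PySem.List.len flatWords = ((flatWords.length : Nat) : Int) by exact PySem.List.len_eq _]
    rw [show PySem.Int.mod ((i : Nat) : Int) ((flatWords.length : Nat) : Int) = ((i % flatWords.length : Nat) : Int) from
      (by exact_mod_cast PySem.Int.mod_natCast i flatWords.length)]
    rw [PySem.List.pyGetD_natCast, flatWords_eq]
    simp [SF]
  · simp [h1, h2, h3, h4]
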